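-- pv_equiv track=rewrite | github.com/MichalMarsalek/Advent-of-code | 2019/day3.py | first_visits
-- ===== SOURCE A (Python) =====
-- def first_visits(moves):
--     visits = dict()
--     i = 1
--     x,y = 0,0
--     for move in moves.split(","):
--         d = move[0]
--         am = int(move[1:])
--         dx, dy = 1,0
--         if d in "LU":
--             dx = -1
--         if d in "UD":
--             dx, dy = dy, dx
--         for _ in range(am):
--             x += dx
--             y += dy
--             if (x,y) not in visits:
--                 visits[(x,y)] = i
--             i += 1
--     return visits
-- ===== SOURCE B (Python) =====
-- DIRS = {"L": (-1, 0), "U": (0, -1), "D": (0, 1)}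
--
-- def first_visits(moves):
--     # pass 1: expand the moves into the ordered list of visited cells
--     cells = []
--     x, y = 0, 0
--     for move in moves.split(","):
--         dx, dy = DIRS.get(move[0], (1, 0))
--         am = int(move[1:])
--         if am > 0:
--             cells += [(x + dx*k, y + dy*k) for k in range(1, am + 1)]
--             x += dx*am
--             y += dy*am
--     # pass 2: assign each cell its first-visit step
--     visits = {}
--     for i, c in enumerate(cells, 1):
--         visits.setdefault(c, i)
--     return visits
-- ===== Notes on version B (the rewrite author's own statement) =====
-- stated objective: alternative
-- what changed: A's single fused loop that walks cell by cell while recording steps into the dict is split into two differently shaped passes: pass 1 expands each move into its whole segment of cells at once (direction table + range comprehension, appended to a flat cell list), pass 2 assigns first-visit steps with enumerate(cells, 1) and setdefault.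
-- outside the precondition, e.g. on first_visits('R2,,U1'): A raises IndexError, B raises IndexError; on first_visits('Rx'): A raises ValueError, B raises ValueError
import Mathlib
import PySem

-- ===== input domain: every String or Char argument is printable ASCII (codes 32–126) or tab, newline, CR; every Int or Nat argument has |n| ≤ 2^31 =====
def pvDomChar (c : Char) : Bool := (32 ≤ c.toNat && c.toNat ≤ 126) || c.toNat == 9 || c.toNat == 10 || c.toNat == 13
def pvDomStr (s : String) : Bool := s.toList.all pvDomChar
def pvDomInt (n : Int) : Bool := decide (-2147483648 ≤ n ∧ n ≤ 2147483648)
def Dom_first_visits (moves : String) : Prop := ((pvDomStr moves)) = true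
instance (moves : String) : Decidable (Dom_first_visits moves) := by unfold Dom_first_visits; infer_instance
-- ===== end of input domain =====

-- B replaces A's fused walk-and-record loop by two passes — expand the moves into the ordered
-- list of visited cells (whole segments at a time via a range comprehension and a direction
-- table), then assign first-visit steps with enumerate+setdefault; same return value.

-- ===== PORT A =====
-- one iteration of A's inner 'for _ in range(am)': state (visits, i, x, y)
def pvA_step (dx dy : Int)
    (st : PySem.Dict (Int × Int) Int × Int × Int × Int) (_ : Int) :
    PySem.Dict (Int × Int) Int × Int × Int × Int :=
  let (visits, i, x, y) := st
  let x := x + dx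
  let y := y + dy
  let visits := if visits.contains (x, y) then visits else visits.insert (x, y) i
  (visits, i + 1, x, y)

-- one iteration of A's outer 'for move in moves.split(",")'
def pvA_move (st : PySem.Dict (Int × Int) Int × Int × Int × Int) (move : String) :
    PySem.Dict (Int × Int) Int × Int × Int × Int :=
  let d := (PySem.List.pyGet? move.toList 0).getD ' '   -- move[0]; IndexError excluded by Pre_
  let am := (PySem.Int.ofChars? (PySem.List.slice move.toList (some 1) none)).getD 0
            -- int(move[1:]); ValueError excluded by Pre_
  let dx : Int := 1
  let dy : Int := 0
  let dx := if d == 'L' || d == 'U' then -1 else dx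
  let p := if d == 'U' || d == 'D' then (dy, dx) else (dx, dy)
  (PySem.List.pyRange 0 am 1).foldl (pvA_step p.1 p.2) st

def first_visits (moves : String) : List (Int × Int × Int) :=
  let st := ((PySem.Str.split? moves ",").getD []).foldl pvA_move (PySem.Dict.empty, 1, 0, 0)
  st.1.items.map (fun q => (q.1.1, q.1.2, q.2))

-- ===== PORT B =====
def pvDIRS : PySem.Dict Char (Int × Int) :=
  PySem.Dict.ofList [('L', (-1, 0)), ('U', (0, -1)), ('D', (0, 1))]

-- pass 1, one move: extend the cell list by the whole segment, move the cursor
def pvB_move (st : List (Int × Int) × Int × Int) (move : String) :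
    List (Int × Int) × Int × Int :=
  let (cells, x, y) := st
  let p := pvDIRS.getD ((PySem.List.pyGet? move.toList 0).getD ' ') (1, 0)
  let am := (PySem.Int.ofChars? (PySem.List.slice move.toList (some 1) none)).getD 0
  if 0 < am then
    (cells ++ (PySem.List.pyRange 1 (am + 1) 1).map (fun k => (x + p.1 * k, y + p.2 * k)),
     x + p.1 * am, y + p.2 * am)
  else (cells, x, y)

def first_visits_alt (moves : String) : List (Int × Int × Int) :=
  let p := ((PySem.Str.split? moves ",").getD []).foldl pvB_move ([], 0, 0)
  -- pass 2: first-visit step per cell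
  let visits := (PySem.List.enumerate p.1 1).foldl
    (fun d ic => d.setdefault ic.2 ic.1) PySem.Dict.empty
  visits.items.map (fun q => (q.1.1, q.1.2, q.2))

-- ===== PRECONDITION & SPEC =====
-- A raises on any comma-piece that is empty (IndexError on move[0]) or whose tail is not an
-- int literal (ValueError in int(move[1:])); exactly those inputs are excluded.
def Pre_first_visits (moves : String) : Prop :=
  ∀ m ∈ (PySem.Str.split? moves ",").getD [],
    m.toList ≠ [] ∧ (PySem.Int.ofChars? (m.toList.drop 1)).isSome = true
instance (moves : String) : Decidable (Pre_first_visits moves) := by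
  unfold Pre_first_visits; infer_instance

def pvWitness_first_visits : String := "R2,U1,L3,D0"

def Spec_first_visits (moves : String) (out : List (Int × Int × Int)) : Prop :=
  out = first_visits_alt moves
instance (moves : String) (out : List (Int × Int × Int)) : Decidable (Spec_first_visits moves out) := by
  unfold Spec_first_visits; infer_instance

-- ===== CLAIM (what is proved, stated in full; the proofs are below) =====
def Claim_equal_first_visits : Prop := ∀ (moves : String), Dom_first_visits moves → Pre_first_visits moves → Spec_first_visits moves (first_visits moves)

-- ===== LEMMAS AND PROOFS =====

-- recording one visited cell at step index s.2 (the shape shared by both proofs' invariant)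
def pvRec (s : PySem.Dict (Int × Int) Int × Int) (c : Int × Int) :
    PySem.Dict (Int × Int) Int × Int :=
  (s.1.setdefault c s.2, s.2 + 1)

-- B's pass 2 is a fold of pvRec over the cell list
lemma pvEnum_fold (cells : List (Int × Int)) (d : PySem.Dict (Int × Int) Int) (i : Int) :
    (PySem.List.enumerate cells i).foldl (fun d ic => d.setdefault ic.2 ic.1) d
      = (cells.foldl pvRec (d, i)).1 := by
  induction cells generalizing d i with
  | nil => simp [PySem.List.enumerate]
  | cons c t ih => rw [PySem.List.enumerate_cons]; simp only [List.foldl_cons, pvRec]; exact ih ..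

-- A's hand-rolled direction decode equals B's table lookup
lemma pvDir (d : Char) :
    (if (d == 'U' || d == 'D') = true
       then ((0 : Int), if (d == 'L' || d == 'U') = true then (-1 : Int) else 1)
       else ((if (d == 'L' || d == 'U') = true then (-1 : Int) else 1), (0 : Int)))
      = pvDIRS.getD d (1, 0) := by
  by_cases h1 : d = 'L' <;> by_cases h2 : d = 'U' <;> by_cases h3 : d = 'D' <;>
    subst_vars <;> first
      | decide
      | · have b1 : ('L' == d) = false := by simp [Ne.symm h1]
          have b2 : ('U' == d) = false := by simp [Ne.symm h2]
          have b3 : ('D' == d) = false := by simp [Ne.symm h3]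
          simp [pvDIRS, PySem.Dict.getD, PySem.Dict.get?, PySem.Dict.ofList, PySem.Dict.update,
                PySem.Dict.empty, PySem.Dict.insert, List.find?, b1, b2, b3, h1, h2, h3]

-- one inner step of A is a pvRec record plus the cursor move
lemma pvA_step_eq (dx dy : Int) (st : PySem.Dict (Int × Int) Int × Int × Int × Int) (j : Int) :
    pvA_step dx dy st j
      = ((pvRec (st.1, st.2.1) (st.2.2.1 + dx, st.2.2.2 + dy)).1,
         (pvRec (st.1, st.2.1) (st.2.2.1 + dx, st.2.2.2 + dy)).2,
         st.2.2.1 + dx, st.2.2.2 + dy) := by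
  obtain ⟨v, i, x, y⟩ := st
  by_cases h : v.contains (x + dx, y + dy)
  · simp [pvA_step, pvRec, PySem.Dict.setdefault_of_contains v i h, h]
  · simp only [Bool.not_eq_true] at h
    simp [pvA_step, pvRec, PySem.Dict.setdefault_of_not_contains v i h, h]

-- A's inner walk over range(n) records exactly B's segment cells and moves the cursor by n steps
lemma pvInner (dx dy : Int) (n : Nat) (v : PySem.Dict (Int × Int) Int) (i x y : Int) :
    (PySem.List.pyRange 0 (n : Int) 1).foldl (pvA_step dx dy) (v, i, x, y)
      = ((((PySem.List.pyRange 1 ((n : Int) + 1) 1).map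
            (fun k => (x + dx * k, y + dy * k))).foldl pvRec (v, i)).1,
         (((PySem.List.pyRange 1 ((n : Int) + 1) 1).map
            (fun k => (x + dx * k, y + dy * k))).foldl pvRec (v, i)).2,
         x + dx * n, y + dy * n) := by
  induction n with
  | zero =>
      simp [PySem.List.pyRange_one_eq_nil]
  | succ m ih =>
      have h0 : (0 : Int) ≤ (m : Int) := by positivity
      have h1 : (1 : Int) ≤ (m : Int) + 1 := by omega
      have e1 : ((m + 1 : Nat) : Int) = (m : Int) + 1 := by push_cast; ring
      rw [e1, PySem.List.pyRange_one_succ_right h0, List.foldl_append, ih]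
      simp only [List.foldl_cons, List.foldl_nil]
      rw [pvA_step_eq,
          show (m : Int) + 1 + 1 = ((m : Int) + 1) + 1 from rfl,
          PySem.List.pyRange_one_succ_right h1, List.map_append, List.foldl_append]
      simp only [List.map_cons, List.map_nil, List.foldl_cons, List.foldl_nil]
      have ex : x + dx * (m : Int) + dx = x + dx * ((m : Int) + 1) := by ring
      have ey : y + dy * (m : Int) + dy = y + dy * ((m : Int) + 1) := by ring
      rw [ex, ey]

-- one move of A, started on a pvRec-fold state, is one move of B followed by the same fold
lemma pvMove (m : String) (cells : List (Int × Int))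
    (s0 : PySem.Dict (Int × Int) Int × Int) (x y : Int) :
    pvA_move ((cells.foldl pvRec s0).1, (cells.foldl pvRec s0).2, x, y) m
      = (((pvB_move (cells, x, y) m).1.foldl pvRec s0).1,
         ((pvB_move (cells, x, y) m).1.foldl pvRec s0).2,
         (pvB_move (cells, x, y) m).2.1, (pvB_move (cells, x, y) m).2.2) := by
  simp only [pvA_move, pvB_move]
  rw [← pvDir ((PySem.List.pyGet? m.toList 0).getD ' ')]
  generalize (PySem.List.pyGet? m.toList 0).getD ' ' = d
  generalize (PySem.Int.ofChars? (PySem.List.slice m.toList (some 1) none)).getD 0 = am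
  generalize (if (d == 'U' || d == 'D') = true
      then ((0 : Int), if (d == 'L' || d == 'U') = true then (-1 : Int) else 1)
      else ((if (d == 'L' || d == 'U') = true then (-1 : Int) else 1), (0 : Int))) = p
  by_cases hpos : 0 < am
  · lift am to ℕ using le_of_lt hpos with n
    rw [pvInner p.1 p.2 n]
    rw [if_pos hpos]
    simp [List.foldl_append]
  · rw [PySem.List.pyRange_one_eq_nil (by omega), if_neg hpos]
    simp

-- the whole of A's fused loop equals B's pass 1 followed by the pvRec fold
lemma pvOuter (ms : List String) (cells : List (Int × Int)) (x y : Int) :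
    ms.foldl pvA_move
        ((cells.foldl pvRec (PySem.Dict.empty, 1)).1,
         (cells.foldl pvRec (PySem.Dict.empty, 1)).2, x, y)
      = (((ms.foldl pvB_move (cells, x, y)).1.foldl pvRec (PySem.Dict.empty, 1)).1,
         ((ms.foldl pvB_move (cells, x, y)).1.foldl pvRec (PySem.Dict.empty, 1)).2,
         (ms.foldl pvB_move (cells, x, y)).2.1,
         (ms.foldl pvB_move (cells, x, y)).2.2) := by
  induction ms generalizing cells x y with
  | nil => simp
  | cons m t ih =>
      simp only [List.foldl_cons]
      rw [pvMove m cells (PySem.Dict.empty, 1) x y,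
          ih (pvB_move (cells, x, y) m).1 (pvB_move (cells, x, y) m).2.1
             (pvB_move (cells, x, y) m).2.2]

-- ===== VERDICT (by name: the statement is the Claim_ definition above) =====
theorem first_visits_spec : Claim_equal_first_visits := by
  intro moves _ _
  simp only [Spec_first_visits, first_visits, first_visits_alt]
  rw [pvEnum_fold]
  have h := pvOuter ((PySem.Str.split? moves ",").getD []) [] 0 0
  simp only [List.foldl_nil] at h
  rw [h]
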